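-- pv_equiv track=rewrite | github.com/erickhangati/code-wars-challenges | 7-KYU/sum-the-repeats.py | repeat_sum
-- ===== SOURCE A (Python) =====
-- def repeat_sum(list_items):
--     nums = set(item for row in list_items for item in row)
--     repeats = []
--     checked = []
--
--     for num in nums:
--         for item_1 in list_items:
--             if num in item_1 and num in checked and num not in repeats:
--                 repeats.append(num)
--             elif num in item_1 and num not in checked:
--                 checked.append(num)
--
--     return sum(repeats)
-- ===== SOURCE B (Python) =====
-- def repeat_sum(list_items):
--     result = set()
--     rest = list(list_items)
--     while rest:
--         row = rest.pop(0)
--         for later in rest: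
--             result |= set(row) & set(later)
--     return sum(result)
-- ===== Notes on version B (the rewrite author's own statement) =====
-- stated objective: alternative
-- what changed: A scans every row once per distinct number while threading growing checked/repeats Python lists (linear membership scans); B instead unions the pairwise set-intersections of rows and sums the resulting set, with no per-number bookkeeping.
import Mathlib
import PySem

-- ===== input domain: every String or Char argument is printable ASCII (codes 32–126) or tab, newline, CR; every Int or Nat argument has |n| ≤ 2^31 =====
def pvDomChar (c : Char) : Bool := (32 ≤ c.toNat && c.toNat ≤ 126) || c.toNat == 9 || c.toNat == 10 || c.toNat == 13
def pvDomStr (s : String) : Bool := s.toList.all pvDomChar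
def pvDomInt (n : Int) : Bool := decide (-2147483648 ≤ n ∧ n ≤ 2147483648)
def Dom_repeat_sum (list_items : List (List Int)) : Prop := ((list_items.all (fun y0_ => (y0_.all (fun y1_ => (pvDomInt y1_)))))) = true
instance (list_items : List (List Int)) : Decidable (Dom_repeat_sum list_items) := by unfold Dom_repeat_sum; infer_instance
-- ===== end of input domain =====

-- B replaces A's per-number scan with checked/repeats lists by a pairwise
-- row-intersection union (alternative decomposition, same exact result).


-- ===== PORT A =====
-- one step of A's inner 'for item_1 in list_items' loop for a fixed num
def repeatSumStep (num : Int) (st : List Int × List Int) (item_1 : List Int) :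
    List Int × List Int :=
  if num ∈ item_1 ∧ num ∈ st.2 ∧ num ∉ st.1 then (st.1 ++ [num], st.2)
  else if num ∈ item_1 ∧ num ∉ st.2 then (st.1, st.2 ++ [num])
  else st

def repeat_sum (list_items : List (List Int)) : Int :=
  let nums : PySem.Set Int := PySem.Set.ofList (list_items.flatMap (fun row => row))
  let st := nums.foldl (fun st num => list_items.foldl (repeatSumStep num) st)
              (([] : List Int), ([] : List Int))
  st.1.sum

-- ===== PORT B =====
-- the 'while rest: row = rest.pop(0); for later in rest: result |= set(row) & set(later)'
def repeatSumAltGo : List (List Int) → PySem.Set Int → PySem.Set Int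
  | [], result => result
  | row :: rest, result =>
      repeatSumAltGo rest
        (rest.foldl (fun res later =>
            PySem.Set.union res (PySem.Set.inter (PySem.Set.ofList row) (PySem.Set.ofList later)))
          result)

def repeat_sum_alt (list_items : List (List Int)) : Int :=
  (repeatSumAltGo list_items PySem.Set.empty).sum

-- ===== PRECONDITION & SPEC =====
def Spec_repeat_sum (list_items : List (List Int)) (out : Int) : Prop := out = repeat_sum_alt list_items
instance (list_items : List (List Int)) (out : Int) : Decidable (Spec_repeat_sum list_items out) := by unfold Spec_repeat_sum; infer_instance

-- ===== CLAIM (what is proved, stated in full; the proofs are below) =====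
def Claim_equal_repeat_sum : Prop := ∀ (list_items : List (List Int)), Dom_repeat_sum list_items → Spec_repeat_sum list_items (repeat_sum list_items)

-- ===== LEMMAS AND PROOFS =====

-- number of rows of `rows` containing x
def rowCnt (x : Int) (rows : List (List Int)) : Nat :=
  rows.countP (fun r => decide (x ∈ r))

lemma rowCnt_cons (x : Int) (r : List Int) (t : List (List Int)) :
    rowCnt x (r :: t) = (if x ∈ r then 1 else 0) + rowCnt x t := by
  simp only [rowCnt, List.countP_cons]
  by_cases h : x ∈ r <;> simp [h] <;> omega

lemma rowCnt_pos_iff (x : Int) (rows : List (List Int)) :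
    1 ≤ rowCnt x rows ↔ ∃ r ∈ rows, x ∈ r := by
  rw [rowCnt]
  constructor
  · intro h
    have := List.countP_pos_iff (l := rows) (p := fun r => decide (x ∈ r)) |>.mp (by omega)
    simpa using this
  · intro h
    have := List.countP_pos_iff (l := rows) (p := fun r => decide (x ∈ r)) |>.mpr (by simpa using h)
    omega

-- A's inner loop when num is already in repeats and checked: no change
lemma innerC (rows : List (List Int)) (num : Int) (repeats checked : List Int)
    (h1 : num ∈ repeats) (h2 : num ∈ checked) :
    rows.foldl (repeatSumStep num) (repeats, checked) = (repeats, checked) := by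
  induction rows with
  | nil => rfl
  | cons r t ih => simp [repeatSumStep, h1, h2]; exact ih

-- A's inner loop when num is checked but not yet repeated
lemma innerB (rows : List (List Int)) (num : Int) (repeats checked : List Int)
    (h1 : num ∉ repeats) (h2 : num ∈ checked) :
    rows.foldl (repeatSumStep num) (repeats, checked) =
      (if 1 ≤ rowCnt num rows then repeats ++ [num] else repeats, checked) := by
  induction rows generalizing repeats with
  | nil => simp [rowCnt]
  | cons r t ih =>
    by_cases hr : num ∈ r
    · have : repeatSumStep num (repeats, checked) r = (repeats ++ [num], checked) := by
        simp [repeatSumStep, hr, h1, h2]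
      simp only [List.foldl_cons, this]
      rw [innerC t num _ _ (by simp) h2]
      simp only [rowCnt_cons, if_pos hr]
      split_ifs <;> first | rfl | omega
    · have : repeatSumStep num (repeats, checked) r = (repeats, checked) := by
        simp [repeatSumStep, hr]
      simp only [List.foldl_cons, this]
      rw [ih repeats h1]
      simp [rowCnt_cons, hr]
      

-- A's inner loop when num is completely fresh
lemma innerA (rows : List (List Int)) (num : Int) (repeats checked : List Int)
    (h1 : num ∉ repeats) (h2 : num ∉ checked) :
    rows.foldl (repeatSumStep num) (repeats, checked) =
      (if 2 ≤ rowCnt num rows then repeats ++ [num] else repeats,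
       if 1 ≤ rowCnt num rows then checked ++ [num] else checked) := by
  induction rows generalizing repeats checked with
  | nil => simp [rowCnt]
  | cons r t ih =>
    by_cases hr : num ∈ r
    · have : repeatSumStep num (repeats, checked) r = (repeats, checked ++ [num]) := by
        simp [repeatSumStep, hr, h2]
      simp only [List.foldl_cons, this]
      rw [innerB t num _ _ h1 (by simp)]
      simp only [rowCnt_cons, if_pos hr]
      split_ifs <;> first | rfl | omega
    · have : repeatSumStep num (repeats, checked) r = (repeats, checked) := by
        simp [repeatSumStep, hr]
      simp only [List.foldl_cons, this]
      rw [ih repeats checked h1 h2]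
      simp [rowCnt_cons, hr]

-- A's outer loop over the distinct numbers
lemma outerA (nums : List Int) (hn : nums.Nodup) (rows : List (List Int)) :
    nums.foldl (fun st num => rows.foldl (repeatSumStep num) st) ([], []) =
      (nums.filter (fun n => decide (2 ≤ rowCnt n rows)),
       nums.filter (fun n => decide (1 ≤ rowCnt n rows))) := by
  induction nums using List.reverseRecOn with
  | nil => simp
  | append_singleton l x ih =>
    have hl : l.Nodup := (List.nodup_append.mp hn).1
    have hx : x ∉ l := by
      have := (List.nodup_append.mp hn).2.2
      intro hmem; exact this x hmem x (by simp) rfl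
    rw [List.foldl_append, ih hl]
    simp only [List.foldl_cons, List.foldl_nil]
    rw [innerA rows x _ _ (fun h => hx (List.mem_of_mem_filter h))
          (fun h => hx (List.mem_of_mem_filter h))]
    simp only [List.filter_append, List.filter_cons, List.filter_nil]
    split_ifs <;> simp_all <;> omega

-- membership/nodup of B's inner fold
lemma innerAlt (row : List Int) (rest : List (List Int)) (res : PySem.Set Int)
    (hres : res.Nodup) :
    (rest.foldl (fun res later =>
        PySem.Set.union res (PySem.Set.inter (PySem.Set.ofList row) (PySem.Set.ofList later)))
      res).Nodup ∧
    ∀ x, x ∈ (rest.foldl (fun res later =>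
        PySem.Set.union res (PySem.Set.inter (PySem.Set.ofList row) (PySem.Set.ofList later)))
      res) ↔ x ∈ res ∨ (x ∈ row ∧ ∃ l ∈ rest, x ∈ l) := by
  induction rest generalizing res with
  | nil => simp [hres]
  | cons r t ih =>
    simp only [List.foldl_cons]
    obtain ⟨hn, hm⟩ := ih (PySem.Set.union res (PySem.Set.inter (PySem.Set.ofList row) (PySem.Set.ofList r)))
      (PySem.Set.nodup_union _ _ hres)
    refine ⟨hn, fun x => ?_⟩
    rw [hm x, PySem.Set.mem_union, PySem.Set.mem_inter, PySem.Set.mem_ofList, PySem.Set.mem_ofList]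
    constructor
    · rintro ((h | ⟨h1, h2⟩) | ⟨h1, l, hl, h2⟩)
      · exact Or.inl h
      · exact Or.inr ⟨h1, r, by simp, h2⟩
      · exact Or.inr ⟨h1, l, by simp [hl], h2⟩
    · rintro (h | ⟨h1, l, hl, h2⟩)
      · exact Or.inl (Or.inl h)
      · rcases List.mem_cons.mp hl with h | h
        · exact Or.inl (Or.inr ⟨h1, h ▸ h2⟩)
        · exact Or.inr ⟨h1, l, h, h2⟩

-- B's recursion: nodup and membership = "x lies in two distinct rows"
lemma goAlt (rows : List (List Int)) (acc : PySem.Set Int) (hacc : acc.Nodup) :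
    (repeatSumAltGo rows acc).Nodup ∧
    ∀ x, x ∈ repeatSumAltGo rows acc ↔ x ∈ acc ∨ 2 ≤ rowCnt x rows := by
  induction rows generalizing acc with
  | nil => simp [repeatSumAltGo, hacc, rowCnt]
  | cons r t ih =>
    simp only [repeatSumAltGo]
    obtain ⟨hin, hmem⟩ := innerAlt r t acc hacc
    obtain ⟨hn, hm⟩ := ih _ hin
    refine ⟨hn, fun x => ?_⟩
    rw [hm x, hmem x, rowCnt_cons]
    by_cases hr : x ∈ r
    · rw [if_pos hr]
      constructor
      · rintro ((h | ⟨_, h2⟩) | h)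
        · exact Or.inl h
        · exact Or.inr (by have := (rowCnt_pos_iff x t).mpr h2; omega)
        · exact Or.inr (by omega)
      · rintro (h | h)
        · exact Or.inl (Or.inl h)
        · rcases Nat.lt_or_ge (rowCnt x t) 2 with h2 | h2
          · exact Or.inl (Or.inr ⟨hr, (rowCnt_pos_iff x t).mp (by omega)⟩)
          · exact Or.inr h2
    · simp [hr]

lemma mem_flat_iff (x : Int) (rows : List (List Int)) :
    x ∈ rows.flatMap (fun row => row) ↔ ∃ r ∈ rows, x ∈ r := by
  simp

-- ===== VERDICT (by name: the statement is the Claim_ definition above) =====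
theorem repeat_sum_spec : Claim_equal_repeat_sum := by
  intro list_items _
  show repeat_sum list_items = repeat_sum_alt list_items
  simp only [repeat_sum, repeat_sum_alt]
  rw [outerA _ (PySem.Set.nodup_ofList _) list_items]
  obtain ⟨hn, hm⟩ := goAlt list_items PySem.Set.empty (by simp [PySem.Set.empty])
  refine List.Perm.sum_eq ?_
  refine (List.perm_ext_iff_of_nodup (List.Nodup.filter _ (PySem.Set.nodup_ofList _)) hn).mpr ?_
  intro x
  rw [hm x, List.mem_filter, PySem.Set.mem_ofList, mem_flat_iff]
  simp only [PySem.Set.empty, List.not_mem_nil, false_or, decide_eq_true_eq]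
  constructor
  · rintro ⟨_, h⟩; exact h
  · intro h
    exact ⟨(rowCnt_pos_iff x list_items).mp (by omega), h⟩
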